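-- pv_equiv track=rewrite | github.com/yjkwon1996/algoStudy | 프로그래머스/lv3/12987. 숫자 게임/숫자 게임.py | solution
-- ===== SOURCE A (Python) =====
-- def solution(A, B):
--     answer = 0
--
--     # 정렬해서 순서대로 비교
--     A.sort()
--     B.sort()
--
--     # 앞에서부터 차례대로 크기 비교
--     for i in range(len(A)) :
--         for j in range(len(B)) :
--             if A[i] < B[j] : # B가 더 큰 경우를 찾으면 그 값 제거 후 answer 추가
--                 answer += 1
--                 B.remove(B[j])
--                 break
--
--
--     return answer
-- ===== SOURCE B (Python) =====
-- def solution(A, B):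
--     # Drive the greedy from B's side: one pass over sorted B with a single
--     # pointer into sorted A (match each b against the smallest unbeaten a).
--     # O(n log n) vs A's O(n^2) inner rescans with list.remove.
--     A2 = sorted(A)
--     B2 = sorted(B)
--     i = 0
--     answer = 0
--     for b in B2:
--         if i < len(A2) and A2[i] < b:
--             i += 1
--             answer += 1
--     return answer
-- ===== Notes on version B (the rewrite author's own statement) =====
-- stated objective: faster
-- what changed: Instead of A's per-A-element rescan of B (inner index loop plus list.remove, O(n^2)), B makes one fold over sorted B driven from B's side, advancing a single pointer into sorted A (match each b against the smallest unbeaten a).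
import Mathlib
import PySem

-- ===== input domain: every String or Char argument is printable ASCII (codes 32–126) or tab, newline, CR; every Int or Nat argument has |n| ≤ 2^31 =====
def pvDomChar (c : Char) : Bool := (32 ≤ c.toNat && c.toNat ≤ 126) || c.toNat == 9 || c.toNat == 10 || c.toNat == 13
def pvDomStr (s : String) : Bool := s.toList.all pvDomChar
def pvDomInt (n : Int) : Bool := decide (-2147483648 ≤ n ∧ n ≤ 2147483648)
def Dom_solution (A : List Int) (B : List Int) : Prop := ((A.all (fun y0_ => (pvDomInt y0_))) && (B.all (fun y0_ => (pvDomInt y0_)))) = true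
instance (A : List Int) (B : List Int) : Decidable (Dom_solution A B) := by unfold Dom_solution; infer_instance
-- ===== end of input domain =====

-- B drives the greedy from B's side: one fold over sorted B with a pointer into
-- sorted A, instead of A's per-A-element rescan of B with list.remove
-- (objective: faster). Python A sorts both arguments in place and removes
-- elements from B; the equivalence proved here is about the RETURN value only.

-- ===== PORT A =====
-- inner 'for j in range(len(B))' with break; B.remove(B[j]) always succeeds in
-- Python (B[j] ∈ B), so the .getD B default is unreachable.
def innerLoop (a : Int) (B : List Int) (j : Nat) : Int × List Int :=
  if h : j < B.length then
    if a < B[j] then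
      (1, (PySem.List.remove? B B[j]).getD B)
    else
      innerLoop a B (j + 1)
  else
    (0, B)
termination_by B.length - j

def outerLoop (A : List Int) (B : List Int) (i : Nat) (answer : Int) : Int :=
  if h : i < A.length then
    let r := innerLoop A[i] B 0
    outerLoop A r.2 (i + 1) (answer + r.1)
  else
    answer
termination_by A.length - i

def solution (A : List Int) (B : List Int) : Int :=
  let A' := PySem.List.sorted A (fun x => x) false
  let B' := PySem.List.sorted B (fun x => x) false
  outerLoop A' B' 0 0

-- ===== PORT B =====
-- 'for b in B2: if i < len(A2) and A2[i] < b: i += 1; answer += 1' as a fold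
-- over B2 with state (i, answer); the short-circuit 'and' is the nested if.
def solution_alt (A : List Int) (B : List Int) : Int :=
  let A2 := PySem.List.sorted A (fun x => x) false
  let B2 := PySem.List.sorted B (fun x => x) false
  (B2.foldl
    (fun (s : Nat × Int) b =>
      if h : s.1 < A2.length then
        if A2[s.1] < b then (s.1 + 1, s.2 + 1) else s
      else s)
    (0, 0)).2

-- ===== PRECONDITION & SPEC =====
def Spec_solution (A : List Int) (B : List Int) (out : Int) : Prop := out = solution_alt A B
instance (A : List Int) (B : List Int) (out : Int) : Decidable (Spec_solution A B out) := by unfold Spec_solution; infer_instance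

-- ===== CLAIM (what is proved, stated in full; the proofs are below) =====
def Claim_equal_solution : Prop := ∀ (A : List Int) (B : List Int), Dom_solution A B → Spec_solution A B (solution A B)

-- ===== LEMMAS AND PROOFS =====

-- abstract form of A's outer loop: for each a, drop the ≤-a prefix of the
-- remaining B, consume its first element if any, but KEEP the prefix
def gRec : List Int → List Int → Int
  | [], _ => 0
  | a :: as, bs =>
    match bs.dropWhile (fun b => decide (b ≤ a)) with
    | [] => gRec as bs
    | _ :: rest => 1 + gRec as (bs.takeWhile (fun b => decide (b ≤ a)) ++ rest)

-- a-driven merge form: skipped b's are discarded for good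
def hRec : List Int → List Int → Int
  | [], _ => 0
  | a :: as, bs =>
    match bs.dropWhile (fun b => decide (b ≤ a)) with
    | [] => 0
    | _ :: rest => 1 + hRec as rest

-- abstract form of B's fold: b-driven merge over the two lists
def mRec : List Int → List Int → Int
  | _, [] => 0
  | [], _ :: _ => 0
  | a :: as, b :: bs => if a < b then 1 + mRec as bs else mRec (a :: as) bs

theorem gRec_nil (as : List Int) : gRec as [] = 0 := by
  induction as with
  | nil => rfl
  | cons a as ih => simp [gRec, ih]

theorem hRec_nil (as : List Int) : hRec as [] = 0 := by
  cases as <;> simp [hRec]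

theorem erase_prefix (t d : List Int) (b : Int) (hb : b ∉ t) :
    (t ++ b :: d).erase b = t ++ d := by
  rw [List.erase_append_right _ hb, List.erase_cons_head]

-- A-side: the inner scan finds the first remaining b with a < b and removes it
theorem inner_spec (a : Int) (B : List Int) (j : Nat)
    (hpre : ∀ x ∈ B.take j, x ≤ a) :
    innerLoop a B j =
      match (B.drop j).dropWhile (fun b => decide (b ≤ a)) with
      | [] => (0, B)
      | _ :: rest => (1, B.take j ++ (B.drop j).takeWhile (fun b => decide (b ≤ a)) ++ rest) := by
  fun_induction innerLoop a B j with
  | case1 j h hlt =>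
    rw [List.drop_eq_getElem_cons h, List.dropWhile_cons_of_neg (by simpa using hlt),
        List.takeWhile_cons_of_neg (by simpa using hlt)]
    have hmem : B[j] ∈ B := List.getElem_mem h
    rw [PySem.List.remove?_eq_some_erase B B[j] hmem]
    have hnot : B[j] ∉ B.take j := by
      intro hx
      exact absurd (hpre _ hx) (by omega)
    have hB : B = B.take j ++ B[j] :: B.drop (j + 1) := by
      conv_lhs => rw [← List.take_append_drop j B]
      rw [List.drop_eq_getElem_cons h]
    simp only []
    have he : B.erase B[j] = B.take j ++ B.drop (j + 1) := by
      nth_rewrite 1 [hB]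
      exact erase_prefix _ _ _ hnot
    rw [he]
    simp
  | case2 j h hlt ih =>
    have hle : B[j] ≤ a := by omega
    have hpre' : ∀ x ∈ B.take (j + 1), x ≤ a := by
      intro x hx
      have hx' : x ∈ B.take j ++ [B[j]] := by
        rw [List.take_add_one, List.getElem?_eq_getElem h] at hx
        simpa using hx
      rcases List.mem_append.1 hx' with hx' | hx'
      · exact hpre _ hx'
      · simp at hx'
        omega
    rw [ih hpre', List.drop_eq_getElem_cons h,
        List.dropWhile_cons_of_pos (by simpa using hle),
        List.takeWhile_cons_of_pos (by simpa using hle)]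
    cases hcase : (B.drop (j + 1)).dropWhile (fun b => decide (b ≤ a)) with
    | nil => simp
    | cons b rest =>
      have hts : B.take (j + 1) = B.take j ++ [B[j]] := by
        rw [List.take_add_one, List.getElem?_eq_getElem h]
        simp
      rw [hts]
      simp only [List.append_assoc, List.singleton_append]
  | case3 j h =>
    rw [List.drop_eq_nil_of_le (by omega)]
    simp

-- A-side: the outer loop computes gRec, and B stays sorted throughout
theorem outer_spec (A : List Int) (B : List Int) (i : Nat) (answer : Int)
    (hs : B.Pairwise (· ≤ ·)) :
    outerLoop A B i answer = answer + gRec (A.drop i) B := by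
  revert hs
  fun_induction outerLoop A B i answer with
  | case1 B i answer h r ih =>
    intro hs
    rw [List.drop_eq_getElem_cons h, gRec]
    have hr : r = innerLoop A[i] B 0 := rfl
    rw [inner_spec A[i] B 0 (by simp)] at hr
    simp only [List.drop_zero, List.take_zero, List.nil_append] at hr
    cases hcase : B.dropWhile (fun b => decide (b ≤ A[i])) with
    | nil =>
      rw [hcase] at hr
      simp only [] at hr
      rw [hr] at ih ⊢
      rw [ih hs]
      simp
    | cons b rest =>
      rw [hcase] at hr
      simp only [] at hr
      have hsub : (B.takeWhile (fun b => decide (b ≤ A[i])) ++ rest).Sublist B := by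
        conv_rhs => rw [← List.takeWhile_append_dropWhile (p := fun b => decide (b ≤ A[i])) (l := B), hcase]
        exact List.Sublist.append_left (List.sublist_cons_self b rest) _
      rw [hr] at ih ⊢
      rw [ih (hs.sublist hsub)]
      simp only []
      omega
  | case2 i answer h =>
    intro hs
    rw [List.drop_eq_nil_of_le (by omega), gRec]
    simp

-- keeping the never-again-matched prefix in front of B does not change gRec
theorem gRec_drop_prefix (as : List Int) (pre bs : List Int)
    (hle : ∀ x ∈ pre, ∀ a ∈ as, x ≤ a) :
    gRec as (pre ++ bs) = gRec as bs := by
  induction as generalizing pre bs with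
  | nil => rfl
  | cons a as ih =>
    have hpa : ∀ x ∈ pre, x ≤ a := fun x hx => hle x hx a (by simp)
    have hdw : pre.dropWhile (fun b => decide (b ≤ a)) = [] :=
      List.dropWhile_eq_nil_iff.2 (by simpa using hpa)
    have htw : pre.takeWhile (fun b => decide (b ≤ a)) = pre :=
      List.takeWhile_eq_self_iff.2 (by simpa using hpa)
    rw [gRec, gRec, List.dropWhile_append, hdw]
    simp only [List.isEmpty_nil, if_true]
    have hle' : ∀ x ∈ pre, ∀ a' ∈ as, x ≤ a' := fun x hx a' ha' => hle x hx a' (by simp [ha'])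
    cases hcase : bs.dropWhile (fun b => decide (b ≤ a)) with
    | nil => exact ih pre bs hle'
    | cons b rest =>
      simp only []
      rw [List.takeWhile_append, htw, if_pos rfl, List.append_assoc,
          ih pre (bs.takeWhile (fun b => decide (b ≤ a)) ++ rest) hle']

-- on a sorted A the kept-prefix loop shape agrees with the a-driven merge
theorem gRec_eq_hRec (as bs : List Int) (hs : as.Pairwise (· ≤ ·)) :
    gRec as bs = hRec as bs := by
  induction as generalizing bs with
  | nil => rfl
  | cons a as ih =>
    have hhead : ∀ a' ∈ as, a ≤ a' := fun a' ha' => (List.pairwise_cons.1 hs).1 a' ha'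
    have hs' : as.Pairwise (· ≤ ·) := (List.pairwise_cons.1 hs).2
    rw [gRec, hRec]
    have htw : ∀ x ∈ bs.takeWhile (fun b => decide (b ≤ a)), ∀ a' ∈ as, x ≤ a' := by
      intro x hx a' ha'
      have hxa : x ≤ a := by simpa using List.mem_takeWhile_imp hx
      exact le_trans hxa (hhead a' ha')
    cases hcase : bs.dropWhile (fun b => decide (b ≤ a)) with
    | nil =>
      have hbs : bs = bs.takeWhile (fun b => decide (b ≤ a)) ++ [] := by
        conv_lhs => rw [← List.takeWhile_append_dropWhile (p := fun b => decide (b ≤ a)) (l := bs), hcase]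
      rw [hbs, gRec_drop_prefix as _ [] htw, gRec_nil]
    | cons b rest =>
      simp only []
      rw [gRec_drop_prefix as _ rest htw, ih rest hs']

-- the a-driven and b-driven merges compute the same count (no sortedness needed)
theorem hRec_eq_mRec (bs as : List Int) : hRec as bs = mRec as bs := by
  induction bs generalizing as with
  | nil =>
    rw [hRec_nil]
    cases as <;> rfl
  | cons b bs ih =>
    cases as with
    | nil => rfl
    | cons a as =>
      by_cases hab : a < b
      · rw [hRec, List.dropWhile_cons_of_neg (by simpa using hab), mRec, if_pos hab]
        simp only []
        rw [ih as]
      · have hba : b ≤ a := by omega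
        rw [mRec, if_neg hab, ← ih (a :: as), hRec, hRec,
            List.dropWhile_cons_of_pos (by simpa using hba)]

-- B-side: the fold with pointer i computes mRec on the remaining suffix of A2
theorem fold_spec (A2 : List Int) (bs : List Int) (i : Nat) (answer : Int) :
    (bs.foldl
      (fun (s : Nat × Int) b =>
        if h : s.1 < A2.length then
          if A2[s.1] < b then (s.1 + 1, s.2 + 1) else s
        else s)
      (i, answer)).2 = answer + mRec (A2.drop i) bs := by
  induction bs generalizing i answer with
  | nil =>
    cases A2.drop i <;> simp [mRec]
  | cons b bs ih =>
    by_cases h : i < A2.length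
    · rw [List.foldl_cons]
      simp only [dif_pos h]
      rw [List.drop_eq_getElem_cons h, mRec]
      by_cases hab : A2[i] < b
      · rw [if_pos hab, ih, if_pos hab]
        omega
      · rw [if_neg hab, ih, if_neg hab, ← List.drop_eq_getElem_cons h]
    · rw [List.foldl_cons]
      simp only [dif_neg h]
      rw [ih]
      have hnil : A2.drop i = [] := List.drop_eq_nil_of_le (by omega)
      rw [hnil]
      cases bs <;> rfl

-- ===== VERDICT (by name: the statement is the Claim_ definition above) =====
theorem solution_spec : Claim_equal_solution := by
  intro A B _
  unfold Spec_solution solution solution_alt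
  have hA : (PySem.List.sorted A (fun x => x) false).Pairwise (· ≤ ·) :=
    PySem.List.sorted_pairwise A (fun x => x)
  have hB : (PySem.List.sorted B (fun x => x) false).Pairwise (· ≤ ·) :=
    PySem.List.sorted_pairwise B (fun x => x)
  rw [outer_spec _ _ _ _ hB]
  simp only []
  rw [fold_spec]
  simp [gRec_eq_hRec _ _ hA, hRec_eq_mRec]
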